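-- pv_equiv track=rewrite | github.com/barandenizkorkmaz/bogazici-university-undergraduate-projects | CMPE462/Projects/Project1/Deliverables/Code/data_handler.py | get_max_index
-- ===== SOURCE A (Python) =====
-- def get_max_index(LIST):
--     max_value = LIST[0]
--     max_index = 0
--     for i in range(1,len(LIST)):
--         if LIST[i]>max_value:
--             max_index = i
--             max_value = LIST[i]
--     return max_index
-- ===== SOURCE B (Python) =====
-- def get_max_index(LIST):
--     return LIST.index(max(LIST))
-- ===== Notes on version B (the rewrite author's own statement) =====
-- stated objective: idiomatic
-- what changed: Replaces A's single fused scan that tracks running max value and index with the idiomatic two-pass LIST.index(max(LIST)): compute the maximum, then find its first occurrence; first-occurrence tie-breaking is preserved.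
import Mathlib
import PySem

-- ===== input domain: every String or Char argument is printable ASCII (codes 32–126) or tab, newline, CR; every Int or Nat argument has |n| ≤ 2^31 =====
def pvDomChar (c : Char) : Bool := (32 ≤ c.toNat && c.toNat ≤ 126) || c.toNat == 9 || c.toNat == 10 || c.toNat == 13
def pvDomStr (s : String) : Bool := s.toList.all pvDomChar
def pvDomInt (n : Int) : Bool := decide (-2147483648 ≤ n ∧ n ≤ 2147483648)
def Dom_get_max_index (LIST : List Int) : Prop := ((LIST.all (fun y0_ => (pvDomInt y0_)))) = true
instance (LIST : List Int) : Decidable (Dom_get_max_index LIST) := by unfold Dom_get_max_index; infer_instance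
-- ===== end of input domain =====

-- B replaces A's fused running-max/index scan with the idiomatic two-pass LIST.index(max(LIST)); equal return values, no speed claim.

-- ===== PORT A =====
-- A: fused scan tracking (max_index, max_value); LIST[0] ported with pyGetD, exact since Pre_ requires LIST ≠ [].
def get_max_index (LIST : List Int) : Int :=
  let max_value := PySem.List.pyGetD LIST 0 0
  let r := (PySem.List.pyRange 1 (LIST.length : Int) 1).foldl
    (fun s i => if PySem.List.pyGetD LIST i 0 > s.2 then (i, PySem.List.pyGetD LIST i 0) else s)
    ((0 : Int), max_value)
  r.1

-- ===== PORT B =====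
-- B: LIST.index(max(LIST)).  max() on [] raises ValueError and .index a ValueError too; both unreachable under Pre_.
def get_max_index_alt (LIST : List Int) : Int :=
  match PySem.List.max? LIST (fun y => y) with
  | none => 0          -- Python: ValueError on empty list; excluded by Pre_
  | some m =>
    match PySem.List.index? LIST m with
    | none => 0        -- unreachable: the max is a member
    | some k => (k : Int)

-- ===== PRECONDITION & SPEC =====
-- A raises IndexError on the empty list (LIST[0]); B raises ValueError there (max of empty sequence).
def Pre_get_max_index (LIST : List Int) : Prop := LIST ≠ []
instance (LIST : List Int) : Decidable (Pre_get_max_index LIST) := by unfold Pre_get_max_index; infer_instance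
def pvWitness_get_max_index : List Int := [3, 7, 7, 1]

def Spec_get_max_index (LIST : List Int) (out : Int) : Prop := out = get_max_index_alt LIST
instance (LIST : List Int) (out : Int) : Decidable (Spec_get_max_index LIST out) := by unfold Spec_get_max_index; infer_instance

-- ===== CLAIM (what is proved, stated in full; the proofs are below) =====
def Claim_equal_get_max_index : Prop := ∀ (LIST : List Int), Dom_get_max_index LIST → Pre_get_max_index LIST → Spec_get_max_index LIST (get_max_index LIST)

-- ===== LEMMAS AND PROOFS =====

theorem index?_exists_of_mem {v : Int} {l : List Int} (h : v ∈ l) :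
    ∃ j, PySem.List.index? l v = some j := by
  cases hjj : PySem.List.index? l v with
  | none =>
    rw [PySem.List.index?_eq_none_iff] at hjj
    exact absurd hjj (by simp [h])
  | some j => exact ⟨j, rfl⟩

-- Invariant of A's loop: folding from index a over the suffix `t = xs.drop a.toNat`
-- yields (a + first index of the suffix maximum, that maximum) if it beats mv, else the incoming state.
theorem loopA_spec (n : Nat) : ∀ (xs : List Int) (a mi mv : Int), 0 ≤ a →
    (xs.length - a.toNat) = n → a.toNat ≤ xs.length →
    ((PySem.List.pyRange a (xs.length : Int) 1).foldl
      (fun s i => if PySem.List.pyGetD xs i 0 > s.2 then (i, PySem.List.pyGetD xs i 0) else s)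
      (mi, mv)) =
    (if mv < (xs.drop a.toNat).foldl max mv
      then (a + (((PySem.List.index? (xs.drop a.toNat) ((xs.drop a.toNat).foldl max mv)).getD 0 : Nat) : Int),
            (xs.drop a.toNat).foldl max mv)
      else (mi, mv)) := by
  induction n with
  | zero =>
    intro xs a mi mv ha hn hle
    have hlen : xs.length = a.toNat := by omega
    have hran : PySem.List.pyRange a (xs.length : Int) 1 = [] := by
      apply PySem.List.pyRange_one_eq_nil; omega
    have hdrop : xs.drop a.toNat = [] := List.drop_eq_nil_of_le (by omega)
    simp [hran, hdrop]
  | succ n ih =>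
    intro xs a mi mv ha hn hle
    have hlt : a.toNat < xs.length := by omega
    have hltI : a < (xs.length : Int) := by omega
    have hget : PySem.List.pyGetD xs a 0 = xs[a.toNat] :=
      PySem.List.pyGetD_eq_getElem xs 0 ha (by omega)
    have hdrop : xs.drop a.toNat = xs[a.toNat] :: xs.drop (a.toNat + 1) :=
      (List.getElem_cons_drop hlt).symm
    have ha1 : (a + 1).toNat = a.toNat + 1 := by omega
    rw [PySem.List.pyRange_one_cons hltI, List.foldl_cons, hget]
    set x := xs[a.toNat] with hx
    set t := xs.drop (a.toNat + 1) with ht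
    have key : ∀ (mi' mv' : Int),
        ((PySem.List.pyRange (a+1) (xs.length : Int) 1).foldl
          (fun s i => if PySem.List.pyGetD xs i 0 > s.2 then (i, PySem.List.pyGetD xs i 0) else s)
          (mi', mv')) =
        (if mv' < t.foldl max mv'
          then ((a+1) + (((PySem.List.index? t (t.foldl max mv')).getD 0 : Nat) : Int), t.foldl max mv')
          else (mi', mv')) := by
      intro mi' mv'
      have := ih xs (a+1) mi' mv' (by omega) (by omega) (by omega)
      rw [ha1] at this; rw [← ht] at this; exact this
    by_cases hxgt : x > mv
    · rw [if_pos hxgt, key a x]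
      have hM : (xs.drop a.toNat).foldl max mv = t.foldl max x := by
        rw [hdrop, List.foldl_cons, max_eq_right (le_of_lt hxgt)]
      set M := t.foldl max x with hMdef
      have hxM : x ≤ M := (PySem.List.le_foldl_max t x).1
      have hmvM : mv < M := lt_of_lt_of_le hxgt hxM
      rw [hM, if_pos hmvM]
      by_cases hxeq : x = M
      · -- first element is already the max: index 0, loop keeps (a, x)
        have : ¬ x < M := by omega
        rw [if_neg this]
        have hidx : PySem.List.index? (xs.drop a.toNat) M = some 0 := by
          rw [hdrop, ← hxeq]; exact PySem.List.index?_cons_self _ _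
        have hidx' : List.idxOf? M (List.drop a.toNat xs) = some 0 := by simpa using hidx
        simp [hidx', hxeq]
      · have hxlt : x < M := lt_of_le_of_ne hxM hxeq
        rw [if_pos hxlt]
        have hmem : M ∈ t := by
          rcases PySem.List.foldl_max_mem t x with h | h
          · exact absurd h.symm hxeq
          · exact h
        obtain ⟨j, hj⟩ := index?_exists_of_mem hmem
        have hidx : PySem.List.index? (xs.drop a.toNat) M = some (j + 1) := by
          rw [hdrop, PySem.List.index?_cons_of_ne _ (fun h => hxeq h), hj]; rfl
        rw [hj, hidx]
        simp only [Option.getD_some, Prod.mk.injEq]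
        exact ⟨by push_cast; ring, trivial⟩
    · simp only [gt_iff_lt] at hxgt
      rw [if_neg (by simpa using hxgt), key mi mv]
      have hM : (xs.drop a.toNat).foldl max mv = t.foldl max mv := by
        rw [hdrop, List.foldl_cons, max_eq_left (by omega)]
      rw [hM]
      set M := t.foldl max mv with hMdef
      by_cases hmvM : mv < M
      · rw [if_pos hmvM, if_pos hmvM]
        have hxne : x ≠ M := by omega
        have hmem : M ∈ t := by
          rcases PySem.List.foldl_max_mem t mv with h | h
          · omega
          · exact h
        obtain ⟨j, hj⟩ := index?_exists_of_mem hmem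
        have hidx : PySem.List.index? (xs.drop a.toNat) M = some (j + 1) := by
          rw [hdrop, PySem.List.index?_cons_of_ne _ hxne, hj]; rfl
        rw [hj, hidx]
        simp only [Option.getD_some, Prod.mk.injEq]
        exact ⟨by push_cast; ring, trivial⟩
      · rw [if_neg hmvM, if_neg hmvM]

-- ===== VERDICT (by name: the statement is the Claim_ definition above) =====
theorem get_max_index_spec : Claim_equal_get_max_index := by
  intro LIST _ hpre
  unfold Spec_get_max_index
  cases LIST with
  | nil => exact absurd rfl hpre
  | cons x t =>
    unfold get_max_index get_max_index_alt
    have h0 : PySem.List.pyGetD (x :: t) 0 0 = x := by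
      rw [PySem.List.pyGetD_eq_getElem (i := 0) (x :: t) 0 (by norm_num) (by simp)]
      simp
    have hloop := loopA_spec t.length (x :: t) 1 0 x (by norm_num) (by simp) (by simp)
    simp only [Int.toNat_one, List.drop_one, List.tail_cons] at hloop
    rw [PySem.List.max?_id_cons]
    simp only [h0]
    have hlen : ((x :: t).length : Int) = (t.length : Int) + 1 := by simp
    rw [hlen] at hloop ⊢
    rw [hloop]
    set M := t.foldl max x with hM
    have hxM : x ≤ M := (PySem.List.le_foldl_max t x).1
    by_cases hxeq : x = M
    · have : ¬ x < M := by omega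
      rw [if_neg this, ← hxeq, PySem.List.index?_cons_self x t]
      rfl
    · have hxlt : x < M := lt_of_le_of_ne hxM hxeq
      rw [if_pos hxlt]
      have hmem : M ∈ t := by
        rcases PySem.List.foldl_max_mem t x with h | h
        · exact absurd h.symm hxeq
        · exact h
      obtain ⟨j, hj⟩ := index?_exists_of_mem hmem
      rw [PySem.List.index?_cons_of_ne t hxeq, hj]
      simp only [Option.map_some, Option.getD_some]
      push_cast; ring
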